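-- pv_equiv track=rewrite | github.com/mrprashantkumar/LeetCode-Submissions-Python | Connecting the graph - GFG/connecting-the-graph.py | Solve
-- ===== SOURCE A (Python) =====
-- class DisjointSet:
--     def __init__(self, n):
--         self.rank = [0]*(n+1)
--         self.size = [1]*(n+1)
--         self.parent = [i for i in range(n+1)]
--
--     def find(self, node):
--         if node == self.parent[node]:
--             return node
--         self.parent[node] = self.find(self.parent[node])
--         return self.parent[node]
--
--     def union(self, u, v):
--         paru = self.find(u)
--         parv = self.find(v)
--
--         if paru == parv:
--             return
--
--         if self.rank[paru] < self.rank[parv]: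
--             self.parent[paru] = parv
--         elif self.rank[paru] < self.rank[parv]:
--             self.parent[parv] = paru
--         else:
--             self.parent[parv] = paru
--             self.rank[paru] += 1
--
-- def Solve(V, adj):
--     m = len(adj)
--     if m < V-1:
--         return -1
--
--     obj = DisjointSet(V)
--     for u, v in adj:
--         obj.union(u, v)
--     ans = 0
--     for i in range(V):
--         if obj.parent[i] == i:
--             ans += 1
--     return ans-1
-- ===== SOURCE B (Python) =====
-- def Solve(V, adj):
--     if len(adj) < V - 1:
--         return -1
--     g = [[] for _ in range(V)]
--     for u, v in adj:
--         g[u].append(v)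
--         g[v].append(u)
--     visited = [False] * V
--     comps = 0
--     for s in range(V):
--         if not visited[s]:
--             comps += 1
--             visited[s] = True
--             stack = [s]
--             while stack:
--                 x = stack.pop()
--                 for y in g[x]:
--                     if not visited[y]:
--                         visited[y] = True
--                         stack.append(y)
--     return comps - 1
-- ===== Notes on version B (the rewrite author's own statement) =====
-- stated objective: alternative
-- what changed: Replaces the union-find forest (union by rank with path compression, then counting DSU roots) by an explicit adjacency list and a visited-array DFS sweep that counts connected components directly.
-- outside the precondition, e.g. on Solve(2, [[0, 2]]): A returns 1, B raises IndexError; on Solve(2, [[0, -1]]): A returns 1, B returns 0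
import Mathlib
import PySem

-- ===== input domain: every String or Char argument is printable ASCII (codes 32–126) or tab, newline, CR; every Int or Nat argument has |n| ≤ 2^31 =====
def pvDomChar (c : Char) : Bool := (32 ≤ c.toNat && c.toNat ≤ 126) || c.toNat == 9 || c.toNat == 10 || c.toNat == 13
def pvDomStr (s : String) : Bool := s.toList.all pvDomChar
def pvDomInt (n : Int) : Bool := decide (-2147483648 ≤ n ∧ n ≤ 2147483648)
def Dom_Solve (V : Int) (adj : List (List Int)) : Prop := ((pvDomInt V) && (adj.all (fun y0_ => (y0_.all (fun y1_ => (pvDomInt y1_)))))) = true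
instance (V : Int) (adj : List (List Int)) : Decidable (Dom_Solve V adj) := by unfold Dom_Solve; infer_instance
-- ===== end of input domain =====

-- B replaces A's union-find (union by rank + path compression, counting DSU roots) by an
-- adjacency-list DFS sweep counting connected components directly (alternative algorithm, similar cost).

-- ===== PORT A =====
-- DisjointSet.find with path compression; the fuel argument is only a totality guard
-- (Python's recursion terminates on every input reached under Pre_Solve).
def dsFind : Nat → List Int → Int → List Int × Int
  | 0, parent, node => (parent, node)
  | fuel+1, parent, node =>
      let p := PySem.List.pyGetD parent node 0
      if node = p then (parent, node)
      else
        let r := dsFind fuel parent p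
        let parent2 := PySem.List.pySetD r.1 node r.2
        (parent2, PySem.List.pyGetD parent2 node 0)

-- DisjointSet.union (the Python `elif` duplicates the `if` condition; kept literally).
def dsUnion (parent rank : List Int) (u v : Int) : List Int × List Int :=
  let f1 := dsFind (parent.length + 1) parent u
  let f2 := dsFind (f1.1.length + 1) f1.1 v
  let paru := f1.2
  let parv := f2.2
  let par := f2.1
  if paru = parv then (par, rank)
  else if PySem.List.pyGetD rank paru 0 < PySem.List.pyGetD rank parv 0 then
    (PySem.List.pySetD par paru parv, rank)
  else if PySem.List.pyGetD rank paru 0 < PySem.List.pyGetD rank parv 0 then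
    (PySem.List.pySetD par parv paru, rank)
  else
    (PySem.List.pySetD par parv paru,
     PySem.List.pySetD rank paru (PySem.List.pyGetD rank paru 0 + 1))

-- one `for u, v in adj` iteration (unpacking needs a 2-element row; other rows are outside Pre_Solve)
def dsEdge (st : List Int × List Int) (row : List Int) : List Int × List Int :=
  match row with
  | [u, v] => dsUnion st.1 st.2 u v
  | _ => st

-- Python also builds the unused `self.size` list; it never influences the result and is omitted.
def Solve (V : Int) (adj : List (List Int)) : Int :=
  let m : Int := adj.length
  if m < V - 1 then -1
  else
    let parent0 := PySem.List.pyRange 0 (V + 1) 1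
    let rank0 := List.replicate (V + 1).toNat (0 : Int)
    let st := adj.foldl dsEdge (parent0, rank0)
    let ans := (PySem.List.pyRange 0 V 1).foldl
        (fun ans i => if PySem.List.pyGetD st.1 i 0 = i then ans + 1 else ans) (0 : Int)
    ans - 1

-- ===== PORT B =====
-- the `while stack` loop; fuel is only a totality guard (each iteration pops one element
-- and every push marks a previously unvisited vertex, so 2*len(g)+2 iterations suffice).
def bfsLoop : Nat → List (List Int) → List Int → List Bool → List Bool
  | 0, _, _, visited => visited
  | fuel+1, g, stack, visited =>
      match stack.getLast? with
      | none => visited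
      | some x =>
          let stack' := stack.dropLast
          let sv := (PySem.List.pyGetD g x []).foldl
              (fun (sv : List Int × List Bool) y =>
                if PySem.List.pyGetD sv.2 y false = false then
                  (sv.1 ++ [y], PySem.List.pySetD sv.2 y true)
                else sv) (stack', visited)
          bfsLoop fuel g sv.1 sv.2

-- one `for u, v in adj` iteration of B's adjacency-list build
def addEdge (g : List (List Int)) (row : List Int) : List (List Int) :=
  if row.length = 2 then
    let u := PySem.List.pyGetD row 0 0
    let v := PySem.List.pyGetD row 1 0
    let g1 := PySem.List.pySetD g u (PySem.List.pyGetD g u [] ++ [v])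
    PySem.List.pySetD g1 v (PySem.List.pyGetD g1 v [] ++ [u])
  else g

def Solve_alt (V : Int) (adj : List (List Int)) : Int :=
  if (adj.length : Int) < V - 1 then -1
  else
    let g0 := (PySem.List.pyRange 0 V 1).map (fun _ => ([] : List Int))
    let g := adj.foldl addEdge g0
    let st := (PySem.List.pyRange 0 V 1).foldl
        (fun (st : List Bool × Int) s =>
          if PySem.List.pyGetD st.1 s false = false then
            (bfsLoop (2 * g.length + 2) g [s] (PySem.List.pySetD st.1 s true), st.2 + 1)
          else st) (List.replicate V.toNat false, 0)
    st.2 - 1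

-- ===== PRECONDITION & SPEC =====
-- When len(adj) ≥ V-1, Pre_ additionally requires every adj row to be a pair of vertices in
-- [0, V): rows of other lengths make A raise ValueError, vertices > V raise IndexError, and
-- vertex V or negative vertices are accepted by A only through its (V+1)-sized DSU and Python's
-- negative-index wraparound, where B raises IndexError or wraps differently.
def Pre_Solve (V : Int) (adj : List (List Int)) : Prop :=
  (adj.length : Int) < V - 1 ∨
    ∀ row ∈ adj, row.length = 2 ∧ ∀ x ∈ row, 0 ≤ x ∧ x < V
instance (V : Int) (adj : List (List Int)) : Decidable (Pre_Solve V adj) := by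
  unfold Pre_Solve; infer_instance

def pvWitness_Solve : Int × List (List Int) := (3, [[0, 1], [1, 2]])

def Spec_Solve (V : Int) (adj : List (List Int)) (out : Int) : Prop := out = Solve_alt V adj
instance (V : Int) (adj : List (List Int)) (out : Int) : Decidable (Spec_Solve V adj out) := by
  unfold Spec_Solve; infer_instance

-- ===== CLAIM (what is proved, stated in full; the proofs are below) =====
def Claim_equal_Solve : Prop := ∀ (V : Int) (adj : List (List Int)),
  Dom_Solve V adj → Pre_Solve V adj → Spec_Solve V adj (Solve V adj)

-- ===== LEMMAS AND PROOFS =====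

/- ---------- generic list helpers ---------- -/

theorem pvGetD_set_self {a : Type} (l : List a) (i : Nat) (h : i < l.length) (x d : a) :
    (l.set i x).getD i d = x := by
  simp [List.getD, List.getElem?_set_self, h]

theorem pvGetD_set_ne {a : Type} (l : List a) (i j : Nat) (h : i ≠ j) (x d : a) :
    (l.set i x).getD j d = l.getD j d := by
  simp [List.getD, List.getElem?_set, h]

theorem pvFoldl_count_ite {a : Type} (p : a → Prop) [DecidablePred p] :
    ∀ (l : List a) (acc : Int),
      l.foldl (fun acc i => if p i then acc + 1 else acc) acc
        = acc + ((l.countP (fun i => decide (p i)) : Nat) : Int) := by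
  intro l
  induction l with
  | nil => simp
  | cons x xs ih =>
      intro acc
      by_cases h : p x <;> simp [h, ih, List.countP_cons] <;> push_cast <;> ring

theorem pvCountP_range_card (p : Nat → Prop) [DecidablePred p] :
    ∀ n : Nat, (List.range n).countP (fun i => decide (p i)) = ((Finset.range n).filter p).card := by
  intro n
  induction n with
  | zero => simp
  | succ n ih =>
      rw [List.range_succ, List.countP_append, Finset.range_add_one, Finset.filter_insert]
      by_cases h : p n <;>
        simp [h, ih, Finset.card_insert_of_notMem (fun hc => (Finset.mem_range.1 (Finset.filter_subset _ _ hc)).false)]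

/- ---------- the undirected connectivity generated by the edge rows ---------- -/

def WFE (n : Nat) (es : List (List Int)) : Prop :=
  ∀ row ∈ es, ∃ u v : Nat, row = [(u : Int), (v : Int)] ∧ u < n ∧ v < n

def estep (es : List (List Int)) (a b : Nat) : Prop :=
  [(a : Int), (b : Int)] ∈ es ∨ [(b : Int), (a : Int)] ∈ es

def conn (es : List (List Int)) (a b : Nat) : Prop :=
  Relation.ReflTransGen (estep es) a b

theorem estep_symm {es : List (List Int)} {a b : Nat} (h : estep es a b) : estep es b a :=
  Or.symm h

theorem conn_symm {es : List (List Int)} {a b : Nat} (h : conn es a b) : conn es b a := by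
  induction h with
  | refl => exact .refl
  | tail _ hstep ih =>
      exact Relation.ReflTransGen.trans (Relation.ReflTransGen.single (estep_symm hstep)) ih

theorem conn_append_left {es ts : List (List Int)} {a b : Nat} (h : conn es a b) :
    conn (es ++ ts) a b := by
  induction h with
  | refl => exact .refl
  | tail _ hstep ih =>
      exact ih.tail (by rcases hstep with h | h
                        · exact Or.inl (List.mem_append_left _ h)
                        · exact Or.inr (List.mem_append_left _ h))

theorem estep_append_singleton {es : List (List Int)} {u v a b : Nat} :
    estep (es ++ [[(u : Int), (v : Int)]]) a b ↔
      estep es a b ∨ (a = u ∧ b = v) ∨ (a = v ∧ b = u) := by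
  simp only [estep, List.mem_append, List.mem_singleton, List.cons.injEq, and_true,
    Nat.cast_inj]
  tauto

theorem conn_append_char {es : List (List Int)} (u v a b : Nat) :
    conn (es ++ [[(u : Int), (v : Int)]]) a b ↔
      conn es a b ∨ (conn es a u ∧ conn es v b) ∨ (conn es a v ∧ conn es u b) := by
  constructor
  · intro h
    induction h with
    | refl => exact Or.inl .refl
    | tail _ hstep ih =>
        rcases estep_append_singleton.1 hstep with hs | ⟨rfl, rfl⟩ | ⟨rfl, rfl⟩
        · rcases ih with h1 | ⟨h1, h2⟩ | ⟨h1, h2⟩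
          · exact Or.inl (h1.tail hs)
          · exact Or.inr (Or.inl ⟨h1, h2.tail hs⟩)
          · exact Or.inr (Or.inr ⟨h1, h2.tail hs⟩)
        · rcases ih with h1 | ⟨h1, h2⟩ | ⟨h1, h2⟩
          · exact Or.inr (Or.inl ⟨h1, .refl⟩)
          · exact Or.inr (Or.inl ⟨h1, .refl⟩)
          · exact Or.inl h1
        · rcases ih with h1 | ⟨h1, h2⟩ | ⟨h1, h2⟩
          · exact Or.inr (Or.inr ⟨h1, .refl⟩)
          · exact Or.inl h1
          · exact Or.inr (Or.inr ⟨h1, .refl⟩)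
  · intro h
    have hstep : conn (es ++ [[(u : Int), (v : Int)]]) u v :=
      Relation.ReflTransGen.single (Or.inl (List.mem_append_right _ (List.mem_singleton.2 rfl)))
    rcases h with h1 | ⟨h1, h2⟩ | ⟨h1, h2⟩
    · exact conn_append_left h1
    · exact ((conn_append_left h1).trans hstep).trans (conn_append_left h2)
    · exact ((conn_append_left h1).trans (conn_symm hstep)).trans (conn_append_left h2)

theorem conn_nil {a b : Nat} : conn ([] : List (List Int)) a b ↔ a = b := by
  constructor
  · intro h
    induction h with
    | refl => rfl
    | tail _ hstep _ => rcases hstep with h | h <;> simp at h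
  · rintro rfl; exact .refl

theorem estep_lt {n : Nat} {es : List (List Int)} {a b : Nat}
    (hwf : WFE n es) (h : estep es a b) : a < n ∧ b < n := by
  rcases h with h | h <;> obtain ⟨u, v, hrow, hu, hv⟩ := hwf _ h <;>
    (simp only [List.cons.injEq, and_true, Nat.cast_inj] at hrow; omega)

/- ---------- the DSU forest, abstractly ---------- -/

def pfun (P : List Int) (i : Nat) : Nat := (P.getD i 0).toNat

def rkf (R : List Int) (i : Nat) : Int := R.getD i 0

def rootIter (P : List Int) : Nat → Nat → Nat
  | 0, i => i
  | k + 1, i => if pfun P i = i then i else rootIter P k (pfun P i)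

def rootD (P : List Int) (i : Nat) : Nat := rootIter P P.length i

def GoodD (n : Nat) (P R : List Int) : Prop :=
  P.length = n + 1 ∧ R.length = n + 1 ∧
  (∀ i, i < n → 0 ≤ P.getD i 0 ∧ P.getD i 0 < (n : Int)) ∧
  P.getD n 0 = (n : Int) ∧
  (∀ i, i ≤ n → pfun P i ≠ i → rkf R i < rkf R (pfun P i))

def muf (n : Nat) (R : List Int) (i : Nat) : Nat :=
  ((Finset.range (n + 1)).filter (fun j => rkf R i ≤ rkf R j)).card

theorem pfun_lt {n : Nat} {P R : List Int} (good : GoodD n P R) {i : Nat} (hi : i < n) :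
    pfun P i < n := by
  obtain ⟨h1, h2⟩ := good.2.2.1 i hi
  unfold pfun
  omega

theorem pfun_n {n : Nat} {P R : List Int} (good : GoodD n P R) : pfun P n = n := by
  unfold pfun
  rw [good.2.2.2.1]
  exact Int.toNat_natCast n

theorem pfun_le {n : Nat} {P R : List Int} (good : GoodD n P R) {i : Nat} (hi : i ≤ n) :
    pfun P i ≤ n := by
  rcases Nat.lt_or_ge i n with h | h
  · exact le_of_lt (pfun_lt good h)
  · have hin : i = n := le_antisymm hi h
    subst hin
    rw [pfun_n good]

theorem pfun_cast {n : Nat} {P R : List Int} (good : GoodD n P R) {i : Nat} (hi : i ≤ n) :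
    ((pfun P i : Nat) : Int) = P.getD i 0 := by
  rcases Nat.lt_or_ge i n with h | h
  · exact Int.toNat_of_nonneg (good.2.2.1 i h).1
  · have hin : i = n := le_antisymm hi h
    subst hin
    rw [pfun_n good, good.2.2.2.1]

theorem pfun_fix_iff {n : Nat} {P R : List Int} (good : GoodD n P R) {i : Nat} (hi : i ≤ n) :
    P.getD i 0 = (i : Int) ↔ pfun P i = i := by
  rw [← pfun_cast good hi]
  exact Int.natCast_inj

theorem muf_pos {n : Nat} {R : List Int} {i : Nat} (hi : i ≤ n) : 0 < muf n R i := by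
  apply Finset.card_pos.2
  exact ⟨i, Finset.mem_filter.2 ⟨Finset.mem_range.2 (by omega), le_refl _⟩⟩

theorem muf_le {n : Nat} {R : List Int} {i : Nat} : muf n R i ≤ n + 1 :=
  le_trans (Finset.card_filter_le _ _) (by simp)

theorem muf_step {n : Nat} {P R : List Int} (good : GoodD n P R) {i : Nat}
    (hi : i ≤ n) (hne : pfun P i ≠ i) : muf n R (pfun P i) < muf n R i := by
  have hrk := good.2.2.2.2 i hi hne
  apply Finset.card_lt_card
  constructor
  · intro j hj
    obtain ⟨hj1, hj2⟩ := Finset.mem_filter.1 hj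
    exact Finset.mem_filter.2 ⟨hj1, le_trans (le_of_lt hrk) hj2⟩
  · intro hsub
    have hmem : i ∈ (Finset.range (n + 1)).filter (fun j => rkf R i ≤ rkf R j) :=
      Finset.mem_filter.2 ⟨Finset.mem_range.2 (by omega), le_refl _⟩
    have := Finset.mem_filter.1 (hsub hmem)
    omega

/- the parent chain and its root -/

def DStep (P : List Int) (a b : Nat) : Prop := pfun P a = b ∧ pfun P a ≠ a

def Reaches (P : List Int) (i r : Nat) : Prop :=
  Relation.ReflTransGen (DStep P) i r ∧ pfun P r = r

theorem reaches_refl {P : List Int} {i : Nat} (h : pfun P i = i) : Reaches P i i :=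
  ⟨.refl, h⟩

theorem reaches_step {P : List Int} {i r : Nat} (hne : pfun P i ≠ i)
    (h : Reaches P (pfun P i) r) : Reaches P i r :=
  ⟨Relation.ReflTransGen.head ⟨rfl, hne⟩ h.1, h.2⟩

theorem reaches_head {P : List Int} {i r : Nat} (h : Reaches P i r) (hne : pfun P i ≠ i) :
    Reaches P (pfun P i) r := by
  obtain ⟨hc, hr⟩ := h
  rcases Relation.ReflTransGen.cases_head hc with rfl | ⟨c, hstep, hrest⟩
  · exact absurd hr hne
  · obtain ⟨hc1, _⟩ := hstep
    subst hc1
    exact ⟨hrest, hr⟩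

theorem reaches_fix_eq {P : List Int} {i r : Nat} (h : Reaches P i r) (hfix : pfun P i = i) :
    r = i := by
  rcases Relation.ReflTransGen.cases_head h.1 with rfl | ⟨c, hstep, _⟩
  · rfl
  · exact absurd hfix hstep.2

theorem reaches_unique {n : Nat} {P R : List Int} (good : GoodD n P R) :
    ∀ i, i ≤ n → ∀ r r', Reaches P i r → Reaches P i r' → r = r' := by
  suffices H : ∀ k i, muf n R i ≤ k → i ≤ n → ∀ r r', Reaches P i r → Reaches P i r' → r = r' by
    exact fun i hi => H (muf n R i) i le_rfl hi
  intro k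
  induction k with
  | zero => intro i hk hi; exact absurd hk (by have := muf_pos (n := n) (R := R) hi; omega)
  | succ k ih =>
      intro i hk hi r r' h h'
      by_cases hfix : pfun P i = i
      · rw [reaches_fix_eq h hfix, reaches_fix_eq h' hfix]
      · have hmu := muf_step good hi hfix
        exact ih (pfun P i) (by omega) (pfun_le good hi) r r'
          (reaches_head h hfix) (reaches_head h' hfix)

theorem rootIter_reaches {n : Nat} {P R : List Int} (good : GoodD n P R) :
    ∀ k i, i ≤ n → muf n R i ≤ k → Reaches P i (rootIter P k i) := by
  intro k
  induction k with
  | zero => intro i hi hk; exact absurd hk (by have := muf_pos (n := n) (R := R) hi; omega)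
  | succ k ih =>
      intro i hi hk
      by_cases hfix : pfun P i = i
      · simp only [rootIter, hfix, if_true]
        exact reaches_refl hfix
      · simp only [rootIter, hfix, if_false]
        have hmu := muf_step good hi hfix
        exact reaches_step hfix (ih (pfun P i) (pfun_le good hi) (by omega))

theorem rootD_reaches {n : Nat} {P R : List Int} (good : GoodD n P R) {i : Nat} (hi : i ≤ n) :
    Reaches P i (rootD P i) := by
  apply rootIter_reaches good P.length i hi
  rw [good.1]
  exact muf_le

theorem rootD_fix {n : Nat} {P R : List Int} (good : GoodD n P R) {i : Nat} (hi : i ≤ n) :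
    pfun P (rootD P i) = rootD P i :=
  (rootD_reaches good hi).2

theorem rootD_of_fix {n : Nat} {P R : List Int} (good : GoodD n P R) {i : Nat} (hi : i ≤ n)
    (h : pfun P i = i) : rootD P i = i :=
  reaches_unique good i hi _ _ (rootD_reaches good hi) (reaches_refl h)

theorem rootD_step {n : Nat} {P R : List Int} (good : GoodD n P R) {i : Nat} (hi : i ≤ n)
    (hne : pfun P i ≠ i) : rootD P (pfun P i) = rootD P i :=
  reaches_unique good (pfun P i) (pfun_le good hi) _ _
    (rootD_reaches good (pfun_le good hi)) (reaches_head (rootD_reaches good hi) hne)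

theorem reaches_bounds {n : Nat} {P R : List Int} (good : GoodD n P R) {i r : Nat}
    (hi : i ≤ n) (h : Reaches P i r) : r ≤ n ∧ (i < n → r < n) := by
  obtain ⟨hc, -⟩ := h
  induction hc with
  | refl => exact ⟨hi, fun h => h⟩
  | tail _ hstep ih =>
      obtain ⟨h1, h2⟩ := ih
      obtain ⟨hs, _⟩ := hstep
      subst hs
      constructor
      · exact pfun_le good h1
      · intro hlt
        exact pfun_lt good (h2 hlt)

theorem rootD_le {n : Nat} {P R : List Int} (good : GoodD n P R) {i : Nat} (hi : i ≤ n) :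
    rootD P i ≤ n := (reaches_bounds good hi (rootD_reaches good hi)).1

theorem rootD_lt {n : Nat} {P R : List Int} (good : GoodD n P R) {i : Nat} (hi : i < n) :
    rootD P i < n := (reaches_bounds good (le_of_lt hi) (rootD_reaches good (le_of_lt hi))).2 hi

theorem rk_lt_reaches {n : Nat} {P R : List Int} (good : GoodD n P R) :
    ∀ i, i ≤ n → ∀ r, Reaches P i r → i ≠ r → rkf R i < rkf R r := by
  suffices H : ∀ k i, muf n R i ≤ k → i ≤ n → ∀ r, Reaches P i r → i ≠ r → rkf R i < rkf R r by
    exact fun i hi r h => H (muf n R i) i le_rfl hi r h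
  intro k
  induction k with
  | zero => intro i hk hi; exact absurd hk (by have := muf_pos (n := n) (R := R) hi; omega)
  | succ k ih =>
      intro i hk hi r h hne
      by_cases hfix : pfun P i = i
      · exact absurd (reaches_fix_eq h hfix).symm hne
      · have hrk := good.2.2.2.2 i hi hfix
        have h' := reaches_head h hfix
        by_cases heq : pfun P i = r
        · rw [← heq]; exact hrk
        · have hmu := muf_step good hi hfix
          exact lt_trans hrk (ih (pfun P i) (by omega) (pfun_le good hi) r h' heq)

theorem rootD_eq_self_iff {n : Nat} {P R : List Int} (good : GoodD n P R) {i : Nat}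
    (hi : i ≤ n) : rootD P i = i ↔ pfun P i = i := by
  constructor
  · intro h
    by_contra hne
    have h1 := good.2.2.2.2 i hi hne
    have h2 := reaches_head (rootD_reaches good hi) hne
    rw [h] at h2
    have h3 := rk_lt_reaches good (pfun P i) (pfun_le good hi) i h2 (fun hc => hne hc)
    omega
  · exact rootD_of_fix good hi

theorem rootD_idem {n : Nat} {P R : List Int} (good : GoodD n P R) {i : Nat} (hi : i ≤ n) :
    rootD P (rootD P i) = rootD P i :=
  rootD_of_fix good (rootD_le good hi) (rootD_fix good hi)

/- ---------- path compression preserves the forest semantics ---------- -/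

theorem pfun_set_self {P : List Int} {x r : Nat} (h : x < P.length) :
    pfun (P.set x ((r : Nat) : Int)) x = r := by
  unfold pfun
  rw [pvGetD_set_self _ _ h]
  simp

theorem pfun_set_ne {P : List Int} {x i : Nat} (h : i ≠ x) (a : Int) :
    pfun (P.set x a) i = pfun P i := by
  unfold pfun
  rw [pvGetD_set_ne _ x i (fun hc => h hc.symm)]

theorem set_root_good {n : Nat} {P R : List Int} (good : GoodD n P R) {x : Nat}
    (hx : x ≤ n) (hne : rootD P x ≠ x) :
    GoodD n (P.set x ((rootD P x : Nat) : Int)) R := by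
  have hxlt : x < n := by
    rcases Nat.lt_or_ge x n with h | h
    · exact h
    · exfalso
      have hxn : x = n := le_antisymm hx h
      subst hxn
      exact hne (rootD_of_fix good le_rfl (pfun_n good))
  have hr_lt : rootD P x < n := rootD_lt good hxlt
  have hxP : x < P.length := by rw [good.1]; omega
  refine ⟨by rw [List.length_set]; exact good.1, good.2.1, ?_, ?_, ?_⟩
  · intro i hi
    by_cases hix : i = x
    · subst hix
      rw [pvGetD_set_self _ _ hxP]
      exact ⟨Int.natCast_nonneg _, by exact_mod_cast hr_lt⟩
    · rw [pvGetD_set_ne _ x i (fun hc => hix hc.symm)]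
      exact good.2.2.1 i hi
  · rw [pvGetD_set_ne _ x n (by omega)]
    exact good.2.2.2.1
  · intro i hi hnei
    by_cases hix : i = x
    · subst hix
      rw [pfun_set_self hxP]
      exact rk_lt_reaches good i hx _ (rootD_reaches good hx) (fun h => hne h.symm)
    · rw [pfun_set_ne hix] at hnei ⊢
      exact good.2.2.2.2 i hi hnei

theorem set_root_rootD {n : Nat} {P R : List Int} {x : Nat} (good : GoodD n P R)
    (good' : GoodD n (P.set x ((rootD P x : Nat) : Int)) R)
    (hx : x ≤ n) (hne : rootD P x ≠ x) :
    ∀ i, i ≤ n → rootD (P.set x ((rootD P x : Nat) : Int)) i = rootD P i := by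
  have hxP : x < P.length := by rw [good.1]; omega
  have hrfix : pfun P (rootD P x) = rootD P x := rootD_fix good hx
  have hrle : rootD P x ≤ n := rootD_le good hx
  suffices H : ∀ k i, muf n R i ≤ k → i ≤ n →
      rootD (P.set x ((rootD P x : Nat) : Int)) i = rootD P i by
    exact fun i hi => H (muf n R i) i le_rfl hi
  intro k
  induction k with
  | zero => intro i hk hi; exact absurd hk (by have := muf_pos (n := n) (R := R) hi; omega)
  | succ k ih =>
      intro i hk hi
      by_cases hix : i = x
      · subst hix
        have hpf : pfun (P.set i ((rootD P i : Nat) : Int)) i = rootD P i := pfun_set_self hxP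
        have h1 : rootD (P.set i ((rootD P i : Nat) : Int)) (rootD P i)
            = rootD (P.set i ((rootD P i : Nat) : Int)) i := by
          have := rootD_step good' hi (by rw [hpf]; exact fun hc => hne hc)
          rw [hpf] at this
          exact this
        have h2 : rootD (P.set i ((rootD P i : Nat) : Int)) (rootD P i) = rootD P i :=
          rootD_of_fix good' hrle (by rw [pfun_set_ne (fun hc => hne hc)]; exact hrfix)
        rw [← h1, h2]
      · by_cases hfix : pfun P i = i
        · rw [rootD_of_fix good' hi (by rw [pfun_set_ne hix]; exact hfix),
              rootD_of_fix good hi hfix]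
        · have hpf : pfun (P.set x ((rootD P x : Nat) : Int)) i = pfun P i := pfun_set_ne hix _
          have h1 := rootD_step good' hi (by rw [hpf]; exact hfix)
          rw [hpf] at h1
          have hmu := muf_step good hi hfix
          rw [← h1, ih (pfun P i) (by omega) (pfun_le good hi), rootD_step good hi hfix]

theorem dsFind_spec (n : Nat) (R : List Int) :
    ∀ (fuel : Nat) (P : List Int) (x : Nat), GoodD n P R → x ≤ n → muf n R x ≤ fuel →
      (dsFind fuel P (x : Int)).1.length = n + 1 ∧
      GoodD n (dsFind fuel P (x : Int)).1 R ∧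
      (∀ i, i ≤ n → rootD (dsFind fuel P (x : Int)).1 i = rootD P i) ∧
      (dsFind fuel P (x : Int)).2 = ((rootD P x : Nat) : Int) := by
  intro fuel
  induction fuel with
  | zero => intro P x good hx hk; exact absurd hk (by have := muf_pos (n := n) (R := R) hx; omega)
  | succ fuel ih =>
      intro P x good hx hk
      have hgetD : PySem.List.pyGetD P (x : Int) 0 = P.getD x 0 := by
        simp [PySem.List.pyGetD_natCast]
      by_cases hfix : ((x : Int)) = PySem.List.pyGetD P (x : Int) 0
      · have hp : pfun P x = x := (pfun_fix_iff good hx).1 (by rw [← hgetD]; exact hfix.symm)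
        have hstep : dsFind (fuel + 1) P (x : Int) = (P, (x : Int)) := by
          simp only [dsFind]
          rw [if_pos hfix]
        rw [hstep]
        exact ⟨good.1, good, fun i _ => rfl, by rw [rootD_of_fix good hx hp]⟩
      · have hp_ne : pfun P x ≠ x := by
          intro hc
          exact hfix (by rw [hgetD, (pfun_fix_iff good hx).2 hc])
        have hcast : PySem.List.pyGetD P ((x : Nat) : Int) 0 = ((pfun P x : Nat) : Int) := by
          rw [hgetD, ← pfun_cast good hx]
        have hmu := muf_step good hx hp_ne
        obtain ⟨hlen1, good1, hroots1, hval1⟩ :=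
          ih P (pfun P x) good (pfun_le good hx) (by omega)
        have hr : rootD P (pfun P x) = rootD P x := rootD_step good hx hp_ne
        have hroot_ne : rootD P x ≠ x := fun hc => hp_ne ((rootD_eq_self_iff good hx).1 hc)
        have hroot1x : rootD (dsFind fuel P ((pfun P x : Nat) : Int)).1 x = rootD P x :=
          hroots1 x hx
        have hxP1 : x < (dsFind fuel P ((pfun P x : Nat) : Int)).1.length := by
          rw [hlen1]; omega
        have hstep : dsFind (fuel + 1) P (x : Int) =
            ((dsFind fuel P ((pfun P x : Nat) : Int)).1.set x ((rootD P x : Nat) : Int),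
             ((rootD P x : Nat) : Int)) := by
          simp only [dsFind]
          rw [if_neg hfix, hcast, hval1, hr]
          simp only [PySem.List.pySetD_natCast]
          rw [PySem.List.pyGetD_natCast]
          rw [pvGetD_set_self _ _ hxP1]
        rw [hstep]
        have hne1 : rootD (dsFind fuel P ((pfun P x : Nat) : Int)).1 x ≠ x := by
          rw [hroot1x]; exact hroot_ne
        have good2 := set_root_good good1 hx hne1
        have hroots2 := set_root_rootD good1 good2 hx hne1
        have hsets : (dsFind fuel P ((pfun P x : Nat) : Int)).1.set x
            ((rootD (dsFind fuel P ((pfun P x : Nat) : Int)).1 x : Nat) : Int) =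
            (dsFind fuel P ((pfun P x : Nat) : Int)).1.set x ((rootD P x : Nat) : Int) := by
          rw [hroot1x]
        rw [hsets] at good2 hroots2
        refine ⟨by rw [List.length_set]; exact hlen1, good2, ?_, rfl⟩
        intro i hi
        rw [hroots2 i hi, hroots1 i hi]

/- ---------- linking two roots ---------- -/

theorem set_link_rootD {n : Nat} {P R R2 : List Int} (good : GoodD n P R)
    {a b : Nat} (good' : GoodD n (P.set a ((b : Nat) : Int)) R2)
    (ha : a ≤ n) (hb : b ≤ n) (hfa : pfun P a = a) (hfb : pfun P b = b) (hab : a ≠ b) :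
    ∀ i, i ≤ n → rootD (P.set a ((b : Nat) : Int)) i = if rootD P i = a then b else rootD P i := by
  have haP : a < P.length := by rw [good.1]; omega
  suffices H : ∀ k i, muf n R i ≤ k → i ≤ n →
      rootD (P.set a ((b : Nat) : Int)) i = if rootD P i = a then b else rootD P i by
    exact fun i hi => H (muf n R i) i le_rfl hi
  intro k
  induction k with
  | zero => intro i hk hi; exact absurd hk (by have := muf_pos (n := n) (R := R) hi; omega)
  | succ k ih =>
      intro i hk hi
      by_cases hia : i = a
      · subst hia
        have hpf : pfun (P.set i ((b : Nat) : Int)) i = b := pfun_set_self haP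
        have h1 : rootD (P.set i ((b : Nat) : Int)) b = rootD (P.set i ((b : Nat) : Int)) i := by
          have := rootD_step good' hi (by rw [hpf]; exact fun hc => hab hc.symm)
          rw [hpf] at this
          exact this
        have h2 : rootD (P.set i ((b : Nat) : Int)) b = b :=
          rootD_of_fix good' hb (by rw [pfun_set_ne (fun hc => hab hc.symm)]; exact hfb)
        rw [← h1, h2, rootD_of_fix good hi hfa, if_pos rfl]
      · by_cases hfix : pfun P i = i
        · rw [rootD_of_fix good' hi (by rw [pfun_set_ne hia]; exact hfix),
              rootD_of_fix good hi hfix, if_neg hia]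
        · have hpf : pfun (P.set a ((b : Nat) : Int)) i = pfun P i := pfun_set_ne hia _
          have h1 := rootD_step good' hi (by rw [hpf]; exact hfix)
          rw [hpf] at h1
          have hmu := muf_step good hi hfix
          rw [← h1, ih (pfun P i) (by omega) (pfun_le good hi), rootD_step good hi hfix]

theorem link_good_b1 {n : Nat} {P R : List Int} (good : GoodD n P R) {a b : Nat}
    (ha : a < n) (hb : b < n) (hfa : pfun P a = a) (hfb : pfun P b = b) (hab : a ≠ b)
    (hrk : rkf R a < rkf R b) : GoodD n (P.set a ((b : Nat) : Int)) R := by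
  have haP : a < P.length := by rw [good.1]; omega
  refine ⟨by rw [List.length_set]; exact good.1, good.2.1, ?_, ?_, ?_⟩
  · intro i hi
    by_cases hia : i = a
    · subst hia
      rw [pvGetD_set_self _ _ haP]
      exact ⟨Int.natCast_nonneg _, by exact_mod_cast hb⟩
    · rw [pvGetD_set_ne _ a i (fun hc => hia hc.symm)]
      exact good.2.2.1 i hi
  · rw [pvGetD_set_ne _ a n (by omega)]
    exact good.2.2.2.1
  · intro i hi hnei
    by_cases hia : i = a
    · subst hia
      rw [pfun_set_self haP]
      exact hrk
    · rw [pfun_set_ne hia] at hnei ⊢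
      exact good.2.2.2.2 i hi hnei

theorem rkf_set_self {R : List Int} {b : Nat} (h : b < R.length) (z : Int) :
    rkf (R.set b z) b = z := by
  unfold rkf
  rw [pvGetD_set_self _ _ h]

theorem rkf_set_ne {R : List Int} {b i : Nat} (h : i ≠ b) (z : Int) :
    rkf (R.set b z) i = rkf R i := by
  unfold rkf
  rw [pvGetD_set_ne _ b i (fun hc => h hc.symm)]

theorem link_good_b2 {n : Nat} {P R : List Int} (good : GoodD n P R) {a b : Nat}
    (ha : a < n) (hb : b < n) (hfa : pfun P a = a) (hfb : pfun P b = b) (hab : a ≠ b)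
    (hrk : ¬ rkf R b < rkf R a) :
    GoodD n (P.set a ((b : Nat) : Int)) (R.set b (rkf R b + 1)) := by
  have haP : a < P.length := by rw [good.1]; omega
  have hbR : b < R.length := by rw [good.2.1]; omega
  refine ⟨by rw [List.length_set]; exact good.1, by rw [List.length_set]; exact good.2.1,
    ?_, ?_, ?_⟩
  · intro i hi
    by_cases hia : i = a
    · subst hia
      rw [pvGetD_set_self _ _ haP]
      exact ⟨Int.natCast_nonneg _, by exact_mod_cast hb⟩
    · rw [pvGetD_set_ne _ a i (fun hc => hia hc.symm)]
      exact good.2.2.1 i hi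
  · rw [pvGetD_set_ne _ a n (by omega)]
    exact good.2.2.2.1
  · intro i hi hnei
    by_cases hia : i = a
    · subst hia
      rw [pfun_set_self haP, rkf_set_self hbR, rkf_set_ne hab _]
      omega
    · rw [pfun_set_ne hia] at hnei ⊢
      have hib : i ≠ b := by
        intro hc
        subst hc
        exact hnei hfb
      rw [rkf_set_ne hib]
      have h5 := good.2.2.2.2 i hi hnei
      by_cases hpb : pfun P i = b
      · rw [hpb, rkf_set_self hbR]
        rw [hpb] at h5
        omega
      · rw [rkf_set_ne hpb]
        exact h5

theorem if_link_iff (pu pv ri rj : Nat) (hne : pu ≠ pv) :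
    ((if ri = pu then pv else ri) = (if rj = pu then pv else rj)) ↔
      (ri = rj ∨ (ri = pu ∧ pv = rj) ∨ (ri = pv ∧ pu = rj)) := by
  split_ifs <;> omega

theorem dsUnion_spec {n : Nat} {P R : List Int} (good : GoodD n P R) (u v : Nat)
    (hu : u < n) (hv : v < n) :
    GoodD n (dsUnion P R (u : Int) (v : Int)).1 (dsUnion P R (u : Int) (v : Int)).2 ∧
    (∀ i j, i ≤ n → j ≤ n →
      (rootD (dsUnion P R (u : Int) (v : Int)).1 i = rootD (dsUnion P R (u : Int) (v : Int)).1 j ↔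
        (rootD P i = rootD P j ∨
         (rootD P i = rootD P u ∧ rootD P v = rootD P j) ∨
         (rootD P i = rootD P v ∧ rootD P u = rootD P j)))) := by
  have hmu1 : muf n R u ≤ P.length + 1 := by
    have h1 := muf_le (n := n) (R := R) (i := u)
    rw [good.1]
    omega
  obtain ⟨hlen1, good1, hroots1, hval1⟩ :=
    dsFind_spec n R (P.length + 1) P u good (le_of_lt hu) hmu1
  have hmu2 : muf n R v ≤ (dsFind (P.length + 1) P (u : Int)).1.length + 1 := by
    have h1 := muf_le (n := n) (R := R) (i := v)
    rw [hlen1]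
    omega
  obtain ⟨hlen2, good2, hroots2, hval2⟩ :=
    dsFind_spec n R ((dsFind (P.length + 1) P (u : Int)).1.length + 1)
      (dsFind (P.length + 1) P (u : Int)).1 v good1 (le_of_lt hv) hmu2
  have hrv : rootD (dsFind (P.length + 1) P (u : Int)).1 v = rootD P v := hroots1 v (le_of_lt hv)
  have hroots : ∀ i, i ≤ n →
      rootD (dsFind ((dsFind (P.length + 1) P (u : Int)).1.length + 1)
        (dsFind (P.length + 1) P (u : Int)).1 (v : Int)).1 i = rootD P i :=
    fun i hi => (hroots2 i hi).trans (hroots1 i hi)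
  have hpu_le : rootD P u ≤ n := le_of_lt (rootD_lt good hu)
  have hpv_le : rootD P v ≤ n := le_of_lt (rootD_lt good hv)
  have hfpu : pfun (dsFind ((dsFind (P.length + 1) P (u : Int)).1.length + 1)
      (dsFind (P.length + 1) P (u : Int)).1 (v : Int)).1 (rootD P u) = rootD P u :=
    (rootD_eq_self_iff good2 hpu_le).1
      (by rw [hroots _ hpu_le]; exact rootD_idem good (le_of_lt hu))
  have hfpv : pfun (dsFind ((dsFind (P.length + 1) P (u : Int)).1.length + 1)
      (dsFind (P.length + 1) P (u : Int)).1 (v : Int)).1 (rootD P v) = rootD P v :=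
    (rootD_eq_self_iff good2 hpv_le).1
      (by rw [hroots _ hpv_le]; exact rootD_idem good (le_of_lt hv))
  have hstep : dsUnion P R (u : Int) (v : Int) =
      (if ((rootD P u : Nat) : Int) = ((rootD P v : Nat) : Int) then
        ((dsFind ((dsFind (P.length + 1) P (u : Int)).1.length + 1)
          (dsFind (P.length + 1) P (u : Int)).1 (v : Int)).1, R)
      else if rkf R (rootD P u) < rkf R (rootD P v) then
        ((dsFind ((dsFind (P.length + 1) P (u : Int)).1.length + 1)
          (dsFind (P.length + 1) P (u : Int)).1 (v : Int)).1.set (rootD P u)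
            ((rootD P v : Nat) : Int), R)
      else if rkf R (rootD P u) < rkf R (rootD P v) then
        ((dsFind ((dsFind (P.length + 1) P (u : Int)).1.length + 1)
          (dsFind (P.length + 1) P (u : Int)).1 (v : Int)).1.set (rootD P v)
            ((rootD P u : Nat) : Int), R)
      else
        ((dsFind ((dsFind (P.length + 1) P (u : Int)).1.length + 1)
          (dsFind (P.length + 1) P (u : Int)).1 (v : Int)).1.set (rootD P v)
            ((rootD P u : Nat) : Int), R.set (rootD P u) (rkf R (rootD P u) + 1))) := by
    simp only [dsUnion, hval1, hval2, hrv, PySem.List.pySetD_natCast,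
      PySem.List.pyGetD_natCast, rkf]
  rw [hstep]
  by_cases hpq : ((rootD P u : Nat) : Int) = ((rootD P v : Nat) : Int)
  · rw [if_pos hpq]
    have hpq' : rootD P u = rootD P v := by exact_mod_cast hpq
    refine ⟨good2, fun i j hi hj => ?_⟩
    rw [hroots i hi, hroots j hj]
    omega
  · rw [if_neg hpq]
    have hne' : rootD P u ≠ rootD P v := fun hc => hpq (by exact_mod_cast hc)
    by_cases hrk : rkf R (rootD P u) < rkf R (rootD P v)
    · rw [if_pos hrk]
      have good3 := link_good_b1 good2 (rootD_lt good hu)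
        (rootD_lt good hv) hfpu hfpv hne' hrk
      have roots3 := set_link_rootD good2 good3 hpu_le hpv_le hfpu hfpv hne'
      refine ⟨good3, fun i j hi hj => ?_⟩
      rw [roots3 i hi, roots3 j hj, hroots i hi, hroots j hj,
        if_link_iff _ _ _ _ hne']
    · rw [if_neg hrk, if_neg hrk]
      have good3 := link_good_b2 good2 (rootD_lt good hv) (rootD_lt good hu) hfpv hfpu
        (fun hc => hne' hc.symm) hrk
      have roots3 := set_link_rootD good2 good3 hpv_le hpu_le hfpv hfpu
        (fun hc => hne' hc.symm)
      refine ⟨good3, fun i j hi hj => ?_⟩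
      rw [roots3 i hi, roots3 j hj, hroots i hi, hroots j hj,
        if_link_iff _ _ _ _ (fun hc => hne' hc.symm)]
      omega

/- ---------- folding the unions over the edge list ---------- -/

theorem dsu_fold (n : Nat) :
    ∀ (rest done : List (List Int)) (P R : List Int), WFE n rest → GoodD n P R →
      (∀ i j, i < n → j < n → (rootD P i = rootD P j ↔ conn done i j)) →
      GoodD n (rest.foldl dsEdge (P, R)).1 (rest.foldl dsEdge (P, R)).2 ∧
      (∀ i j, i < n → j < n →
        (rootD (rest.foldl dsEdge (P, R)).1 i = rootD (rest.foldl dsEdge (P, R)).1 j ↔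
          conn (done ++ rest) i j)) := by
  intro rest
  induction rest with
  | nil =>
      intro done P R _ good hD
      refine ⟨good, fun i j hi hj => ?_⟩
      rw [List.append_nil]
      exact hD i j hi hj
  | cons row rest ih =>
      intro done P R hwf good hD
      obtain ⟨u, v, hrow, hu, hv⟩ := hwf row List.mem_cons_self
      subst hrow
      rw [List.foldl_cons]
      have hEdge : dsEdge (P, R) [(u : Int), (v : Int)] = dsUnion P R (u : Int) (v : Int) := rfl
      rw [hEdge]
      obtain ⟨good', hchar⟩ := dsUnion_spec good u v hu hv
      have hD' : ∀ i j, i < n → j < n →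
          (rootD (dsUnion P R (u : Int) (v : Int)).1 i =
              rootD (dsUnion P R (u : Int) (v : Int)).1 j ↔
            conn (done ++ [[(u : Int), (v : Int)]]) i j) := by
        intro i j hi hj
        rw [hchar i j (le_of_lt hi) (le_of_lt hj), conn_append_char u v i j,
          hD i j hi hj, hD i u hi hu, hD v j hv hj, hD i v hi hv, hD u j hu hj]
      have hwf' : WFE n rest := fun r hr => hwf r (List.mem_cons_of_mem _ hr)
      have hmain := ih (done ++ [[(u : Int), (v : Int)]])
        (dsUnion P R (u : Int) (v : Int)).1 (dsUnion P R (u : Int) (v : Int)).2 hwf' good' hD'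
      rw [List.append_assoc] at hmain
      simpa using hmain

/- ---------- B's adjacency list ---------- -/

def nbr (g : List (List Int)) (x y : Nat) : Prop := ((y : Nat) : Int) ∈ g.getD x []

def GoodG (n : Nat) (g : List (List Int)) (es : List (List Int)) : Prop :=
  g.length = n ∧
  (∀ x, x < n → ∀ z ∈ g.getD x [], ∃ y : Nat, z = (y : Int) ∧ y < n) ∧
  (∀ x y, x < n → y < n → (nbr g x y ↔ estep es x y))

theorem build_fold (n : Nat) :
    ∀ (rest done : List (List Int)) (g : List (List Int)), WFE n rest → GoodG n g done →
      GoodG n (rest.foldl addEdge g) (done ++ rest) := by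
  intro rest
  induction rest with
  | nil =>
      intro done g _ hg
      rw [List.append_nil]
      exact hg
  | cons row rest ih =>
      intro done g hwf hg
      obtain ⟨u, v, hrow, hu, hv⟩ := hwf row List.mem_cons_self
      subst hrow
      rw [List.foldl_cons]
      have hul : u < g.length := by rw [hg.1]; omega
      have hvl : v < (g.set u (g.getD u [] ++ [(v : Int)])).length := by
        rw [List.length_set, hg.1]; omega
      have hAdd : addEdge g [(u : Int), (v : Int)] =
          (g.set u (g.getD u [] ++ [(v : Int)])).set v
            ((g.set u (g.getD u [] ++ [(v : Int)])).getD v [] ++ [(u : Int)]) := by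
        have h0 : PySem.List.pyGetD [(u : Int), (v : Int)] 0 0 = (u : Int) := by
          have hc : (0 : Int) = ((0 : Nat) : Int) := by norm_num
          rw [hc, PySem.List.pyGetD_natCast]
          rfl
        have h1 : PySem.List.pyGetD [(u : Int), (v : Int)] 1 0 = (v : Int) := by
          have hc : (1 : Int) = ((1 : Nat) : Int) := by norm_num
          rw [hc, PySem.List.pyGetD_natCast]
          rfl
        simp only [addEdge]
        rw [if_pos (by simp), h0, h1]
        simp only [PySem.List.pySetD_natCast, PySem.List.pyGetD_natCast]
      rw [hAdd]
      set g1 := g.set u (g.getD u [] ++ [(v : Int)]) with hg1def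
      set g2 := g1.set v (g1.getD v [] ++ [(u : Int)]) with hg2def
      have hg1get : ∀ x : Nat, g1.getD x [] =
          if x = u then g.getD u [] ++ [(v : Int)] else g.getD x [] := by
        intro x
        by_cases hxu : x = u
        · subst hxu
          rw [hg1def, pvGetD_set_self _ _ hul, if_pos rfl]
        · rw [hg1def, pvGetD_set_ne _ u x (fun hc => hxu hc.symm), if_neg hxu]
      have hg2get : ∀ x : Nat, g2.getD x [] =
          if x = v then g1.getD v [] ++ [(u : Int)] else g1.getD x [] := by
        intro x
        by_cases hxv : x = v
        · subst hxv
          rw [hg2def, pvGetD_set_self _ _ hvl, if_pos rfl]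
        · rw [hg2def, pvGetD_set_ne _ v x (fun hc => hxv hc.symm), if_neg hxv]
      have hg2good : GoodG n g2 (done ++ [[(u : Int), (v : Int)]]) := by
        refine ⟨by rw [hg2def, List.length_set, hg1def, List.length_set]; exact hg.1, ?_, ?_⟩
        · intro x hx z hz
          rw [hg2get x] at hz
          split_ifs at hz with h1
          · rcases List.mem_append.1 hz with hz | hz
            · rw [hg1get v] at hz
              split_ifs at hz with h2
              · rcases List.mem_append.1 hz with hz | hz
                · exact hg.2.1 u (by omega) z hz
                · exact ⟨v, List.mem_singleton.1 hz, hv⟩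
              · exact hg.2.1 v (by omega) z hz
            · exact ⟨u, List.mem_singleton.1 hz, hu⟩
          · rw [hg1get x] at hz
            split_ifs at hz with h2
            · rcases List.mem_append.1 hz with hz | hz
              · exact hg.2.1 u (by omega) z hz
              · exact ⟨v, List.mem_singleton.1 hz, hv⟩
            · exact hg.2.1 x hx z hz
        · intro x y hx hy
          rw [estep_append_singleton, ← hg.2.2 x y hx hy]
          unfold nbr
          rw [hg2get x]
          by_cases hxv : x = v <;> by_cases hxu : x = u
          · subst hxv
            rw [if_pos rfl, hg1get x, if_pos hxu]
            subst hxu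
            simp only [List.mem_append, List.mem_singleton, List.cons.injEq, and_true,
              Nat.cast_inj]
            tauto
          · subst hxv
            rw [if_pos rfl, hg1get x, if_neg hxu]
            simp only [List.mem_append, List.mem_singleton, Nat.cast_inj]
            tauto
          · subst hxu
            rw [if_neg hxv, hg1get x, if_pos rfl]
            simp only [List.mem_append, List.mem_singleton, Nat.cast_inj]
            tauto
          · rw [if_neg hxv, hg1get x, if_neg hxu]
            tauto
      have hwf' : WFE n rest := fun r hr => hwf r (List.mem_cons_of_mem _ hr)
      have hmain := ih (done ++ [[(u : Int), (v : Int)]]) g2 hwf' hg2good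
      rw [List.append_assoc] at hmain
      simpa using hmain

/- ---------- B's DFS sweep ---------- -/

def vget (vis : List Bool) (i : Nat) : Bool := vis.getD i false

def unvis (n : Nat) (vis : List Bool) : Nat :=
  ((Finset.range n).filter (fun i => vget vis i = false)).card

def pushF (sv : List Int × List Bool) (y : Int) : List Int × List Bool :=
  if PySem.List.pyGetD sv.2 y false = false then (sv.1 ++ [y], PySem.List.pySetD sv.2 y true)
  else sv

theorem vget_set_self {vis : List Bool} {y : Nat} (h : y < vis.length) (b : Bool) :
    vget (vis.set y b) y = b := by
  unfold vget
  rw [pvGetD_set_self _ _ h]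

theorem vget_set_ne {vis : List Bool} {y i : Nat} (h : i ≠ y) (b : Bool) :
    vget (vis.set y b) i = vget vis i := by
  unfold vget
  rw [pvGetD_set_ne _ y i (fun hc => h hc.symm)]

theorem unvis_set_lt {n : Nat} {vis : List Bool} (hlen : vis.length = n) {y : Nat}
    (hy : y < n) (hv : vget vis y = false) : unvis n (vis.set y true) < unvis n vis := by
  have hyl : y < vis.length := by rw [hlen]; exact hy
  apply Finset.card_lt_card
  constructor
  · intro i hi
    obtain ⟨hi1, hi2⟩ := Finset.mem_filter.1 hi
    refine Finset.mem_filter.2 ⟨hi1, ?_⟩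
    by_cases hiy : i = y
    · subst hiy
      rw [vget_set_self hyl] at hi2
      exact absurd hi2 (by simp)
    · rwa [vget_set_ne hiy] at hi2
  · intro hsub
    have hy1 : y ∈ (Finset.range n).filter (fun i => vget vis i = false) :=
      Finset.mem_filter.2 ⟨Finset.mem_range.2 hy, hv⟩
    have h2 := (Finset.mem_filter.1 (hsub hy1)).2
    rw [vget_set_self hyl] at h2
    exact absurd h2 (by simp)

theorem fold_mark (n : Nat) (es : List (List Int)) (s : Nat) :
    ∀ (ys : List Int) (st0 : List Int) (vis0 : List Bool),
      (∀ z ∈ ys, ∃ y : Nat, z = (y : Int) ∧ y < n ∧ conn es s y) →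
      vis0.length = n →
      ((ys.foldl pushF (st0, vis0)).2.length = n ∧
       (∀ i, i < n → vget vis0 i = true → vget (ys.foldl pushF (st0, vis0)).2 i = true) ∧
       (∀ i, i < n → vget (ys.foldl pushF (st0, vis0)).2 i = true →
          vget vis0 i = true ∨ (i : Int) ∈ ys) ∧
       (∀ y : Nat, (y : Int) ∈ ys → y < n → vget (ys.foldl pushF (st0, vis0)).2 y = true) ∧
       (∀ x ∈ st0, x ∈ (ys.foldl pushF (st0, vis0)).1) ∧
       (∀ x ∈ (ys.foldl pushF (st0, vis0)).1, x ∈ st0 ∨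
          ∃ y : Nat, x = (y : Int) ∧ y < n ∧ conn es s y ∧
            vget (ys.foldl pushF (st0, vis0)).2 y = true ∧ vget vis0 y = false) ∧
       (∀ i, i < n → vget (ys.foldl pushF (st0, vis0)).2 i = true → vget vis0 i = false →
          (i : Int) ∈ (ys.foldl pushF (st0, vis0)).1) ∧
       (ys.foldl pushF (st0, vis0)).1.length + 2 * unvis n (ys.foldl pushF (st0, vis0)).2 ≤
          st0.length + 2 * unvis n vis0) := by
  intro ys
  induction ys with
  | nil =>
      intro st0 vis0 _ hlen
      simp only [List.foldl_nil]
      refine ⟨hlen, fun i _ h => h, fun i _ h => Or.inl h, fun y hy => absurd hy (by simp),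
        fun x hx => hx, fun x hx => Or.inl hx, fun i _ h1 h2 => ?_, le_refl _⟩
      rw [h1] at h2
      exact absurd h2 (by simp)
  | cons z ys ih =>
      intro st0 vis0 hys hlen
      obtain ⟨y, rfl, hyn, hconn⟩ := hys z List.mem_cons_self
      have hys' : ∀ z ∈ ys, ∃ y : Nat, z = (y : Int) ∧ y < n ∧ conn es s y :=
        fun z hz => hys z (List.mem_cons_of_mem _ hz)
      have hyl : y < vis0.length := by rw [hlen]; exact hyn
      rw [List.foldl_cons]
      by_cases hc : vget vis0 y = false
      · have hpush : pushF (st0, vis0) ((y : Nat) : Int) =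
            (st0 ++ [(y : Int)], vis0.set y true) := by
          unfold pushF
          simp only [PySem.List.pyGetD_natCast]
          have hc' : (st0, vis0).2.getD y false = false := hc
          rw [if_pos hc', PySem.List.pySetD_natCast]
        rw [hpush]
        have hlen1 : (vis0.set y true).length = n := by rw [List.length_set]; exact hlen
        obtain ⟨C1, C2, C3, C4, C5, C6, C7, C8⟩ :=
          ih (st0 ++ [(y : Int)]) (vis0.set y true) hys' hlen1
        have hvself : vget (vis0.set y true) y = true := vget_set_self hyl _
        refine ⟨C1, ?_, ?_, ?_, ?_, ?_, ?_, ?_⟩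
        · intro i hi h
          by_cases hiy : i = y
          · subst hiy
            exact C2 i hi hvself
          · exact C2 i hi (by rw [vget_set_ne hiy]; exact h)
        · intro i hi h
          rcases C3 i hi h with h1 | h1
          · by_cases hiy : i = y
            · subst hiy
              exact Or.inr List.mem_cons_self
            · exact Or.inl (by rw [vget_set_ne hiy] at h1; exact h1)
          · exact Or.inr (List.mem_cons_of_mem _ h1)
        · intro y' hy' hy'n
          rcases List.mem_cons.1 hy' with h1 | h1
          · have hyy : y' = y := Nat.cast_inj.1 h1
            subst hyy
            exact C2 y' hy'n hvself
          · exact C4 y' h1 hy'n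
        · intro x hx
          exact C5 x (List.mem_append_left _ hx)
        · intro x hx
          rcases C6 x hx with h1 | h1
          · rcases List.mem_append.1 h1 with h2 | h2
            · exact Or.inl h2
            · exact Or.inr ⟨y, List.mem_singleton.1 h2, hyn, hconn, C2 y hyn hvself, hc⟩
          · obtain ⟨y', hx1, hy'2, hy'3, hy'4, hy'5⟩ := h1
            by_cases hy'y : y' = y
            · subst hy'y
              exact absurd (hvself.symm.trans hy'5) (by simp)
            · exact Or.inr ⟨y', hx1, hy'2, hy'3, hy'4,
                by rw [vget_set_ne hy'y] at hy'5; exact hy'5⟩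
        · intro i hi h1 h2
          by_cases hiy : i = y
          · subst hiy
            exact C5 _ (List.mem_append_right _ (List.mem_singleton.2 rfl))
          · exact C7 i hi h1 (by rw [vget_set_ne hiy]; exact h2)
        · have hdec := unvis_set_lt hlen hyn hc
          have := C8
          rw [List.length_append] at this
          simp only [List.length_singleton] at this
          omega
      · have hpush : pushF (st0, vis0) ((y : Nat) : Int) = (st0, vis0) := by
          unfold pushF
          simp only [PySem.List.pyGetD_natCast]
          have hc' : ¬ (st0, vis0).2.getD y false = false := hc
          rw [if_neg hc']
        rw [hpush]
        have hctrue : vget vis0 y = true := by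
          revert hc
          cases vget vis0 y <;> simp
        obtain ⟨C1, C2, C3, C4, C5, C6, C7, C8⟩ := ih st0 vis0 hys' hlen
        refine ⟨C1, C2, ?_, ?_, C5, C6, C7, C8⟩
        · intro i hi h
          rcases C3 i hi h with h1 | h1
          · exact Or.inl h1
          · exact Or.inr (List.mem_cons_of_mem _ h1)
        · intro y' hy' hy'n
          rcases List.mem_cons.1 hy' with h1 | h1
          · have hyy : y' = y := Nat.cast_inj.1 h1
            subst hyy
            exact C2 y' hy'n hctrue
          · exact C4 y' h1 hy'n

theorem bfs_spec (n : Nat) (g es : List (List Int)) (hg : GoodG n g es) (hwf : WFE n es)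
    (s : Nat) (hs : s < n) (vis0 : List Bool) (hlen0 : vis0.length = n)
    (h0closed : ∀ i j, i < n → j < n → vget vis0 i = true → conn es i j → vget vis0 j = true)
    (hs0 : vget vis0 s = false) :
    ∀ (fuel : Nat) (stack : List Int) (vis : List Bool),
      vis.length = n →
      vget vis s = true →
      (∀ x ∈ stack, ∃ xn : Nat, x = (xn : Int) ∧ xn < n ∧ vget vis xn = true ∧ conn es s xn) →
      (∀ i, i < n → vget vis i = true → vget vis0 i = true ∨ conn es s i) →
      (∀ i, i < n → vget vis0 i = true → vget vis i = true) →
      (∀ x, x < n → vget vis x = true → vget vis0 x = false → (x : Int) ∉ stack →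
        ∀ y, y < n → estep es x y → vget vis y = true) →
      stack.length + 2 * unvis n vis ≤ fuel →
      ((bfsLoop fuel g stack vis).length = n ∧
       ∀ i, i < n → (vget (bfsLoop fuel g stack vis) i = true ↔
          (vget vis0 i = true ∨ conn es s i))) := by
  have hdone : ∀ vis : List Bool,
      vget vis s = true →
      (∀ i, i < n → vget vis i = true → vget vis0 i = true ∨ conn es s i) →
      (∀ i, i < n → vget vis0 i = true → vget vis i = true) →
      (∀ x, x < n → vget vis x = true → vget vis0 x = false →
        ∀ y, y < n → estep es x y → vget vis y = true) →
      ∀ i, i < n → (vget vis i = true ↔ (vget vis0 i = true ∨ conn es s i)) := by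
    intro vis hvs hsound hmono hfront
    have hcompl : ∀ i, conn es s i → i < n → vget vis i = true := by
      intro i hconn
      induction hconn with
      | refl => intro _; exact hvs
      | @tail b c hpath hstep ihh =>
          intro hc2
          obtain ⟨hb, _⟩ := estep_lt hwf hstep
          have hvb := ihh hb
          have hb0 : vget vis0 b = false := by
            by_contra hbt
            have hbt' : vget vis0 b = true := by
              revert hbt
              cases vget vis0 b <;> simp
            have hcon := h0closed b s hb hs hbt' (conn_symm hpath)
            rw [hcon] at hs0
            exact absurd hs0 (by simp)
          exact hfront b hb hvb hb0 _ hc2 hstep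
    intro i hi
    constructor
    · exact hsound i hi
    · intro h
      rcases h with h | h
      · exact hmono i hi h
      · exact hcompl i h hi
  intro fuel
  induction fuel with
  | zero =>
      intro stack vis hlen hvs hstack hsound hmono hfront hfuel
      have hempty : stack = [] := by
        have : stack.length = 0 := by omega
        exact List.eq_nil_of_length_eq_zero this
      subst hempty
      simp only [bfsLoop]
      exact ⟨hlen, hdone vis hvs hsound hmono
        (fun x hx h1 h2 => hfront x hx h1 h2 (by simp))⟩
  | succ fuel ih =>
      intro stack vis hlen hvs hstack hsound hmono hfront hfuel
      by_cases hst : stack = []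
      · subst hst
        simp only [bfsLoop, List.getLast?_nil]
        exact ⟨hlen, hdone vis hvs hsound hmono
          (fun x hx h1 h2 => hfront x hx h1 h2 (by simp))⟩
      · have hsome : stack.getLast? = some (stack.getLast hst) :=
          List.getLast?_eq_some_getLast hst
        obtain ⟨xn, hxeq, hxn, hxvis, hxconn⟩ := hstack _ (List.getLast_mem hst)
        have hlam : (fun (sv : List Int × List Bool) y =>
            if PySem.List.pyGetD sv.2 y false = false then
              (sv.1 ++ [y], PySem.List.pySetD sv.2 y true)
            else sv) = pushF := rfl
        have hnbrs : PySem.List.pyGetD g (stack.getLast hst) [] = g.getD xn [] := by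
          rw [hxeq, PySem.List.pyGetD_natCast]
        have hys : ∀ z ∈ g.getD xn [], ∃ y : Nat, z = (y : Int) ∧ y < n ∧ conn es s y := by
          intro z hz
          obtain ⟨y, rfl, hyn⟩ := hg.2.1 xn hxn z hz
          exact ⟨y, rfl, hyn, hxconn.tail ((hg.2.2 xn y hxn hyn).1 hz)⟩
        obtain ⟨C1, C2, C3, C4, C5, C6, C7, C8⟩ :=
          fold_mark n es s (g.getD xn []) stack.dropLast vis hys hlen
        simp only [bfsLoop, hsome, hlam, hnbrs]
        apply ih
        · exact C1
        · exact C2 s hs hvs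
        · intro x' hx'
          rcases C6 x' hx' with h1 | h1
          · obtain ⟨yn, hy1, hy2, hy3, hy4⟩ :=
              hstack x' ((List.dropLast_sublist (l := stack)).subset h1)
            exact ⟨yn, hy1, hy2, C2 yn hy2 hy3, hy4⟩
          · obtain ⟨yn, hy1, hy2, hy3, hy4, _⟩ := h1
            exact ⟨yn, hy1, hy2, hy4, hy3⟩
        · intro i hi h
          rcases C3 i hi h with h1 | h1
          · exact hsound i hi h1
          · obtain ⟨y, hyeq, _, hy3⟩ := hys _ h1
            have hiy : i = y := Nat.cast_inj.1 hyeq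
            subst hiy
            exact Or.inr hy3
        · intro i hi h
          exact C2 i hi (hmono i hi h)
        · intro x' hx' h1 h2 h3
          by_cases hvx' : vget vis x' = true
          · by_cases hmemstk : ((x' : Nat) : Int) ∈ stack
            · by_cases hmemdl : ((x' : Nat) : Int) ∈ stack.dropLast
              · exact absurd (C5 _ hmemdl) h3
              · have hx'last : ((x' : Nat) : Int) = stack.getLast hst := by
                  have hsplit := List.dropLast_concat_getLast hst
                  rw [← hsplit] at hmemstk
                  rcases List.mem_append.1 hmemstk with hm | hm
                  · exact absurd hm hmemdl
                  · exact List.mem_singleton.1 hm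
                have hx'xn : x' = xn := by
                  rw [hxeq] at hx'last
                  exact Nat.cast_inj.1 hx'last
                subst hx'xn
                intro y hy hstep'
                exact C4 y ((hg.2.2 x' y hx' hy).2 hstep') hy
            · intro y hy hstep'
              exact C2 y hy (hfront x' hx' hvx' h2 hmemstk y hy hstep')
          · have hvx'f : vget vis x' = false := by
              revert hvx'
              cases vget vis x' <;> simp
            exact absurd (C7 x' hx' h1 hvx'f) h3
        · have hlendl : stack.dropLast.length = stack.length - 1 := by
            rw [List.length_dropLast]
          have hpos : 0 < stack.length := List.length_pos_of_ne_nil hst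
          omega

def sweepF (g : List (List Int)) (st : List Bool × Int) (s : Int) : List Bool × Int :=
  if PySem.List.pyGetD st.1 s false = false then
    (bfsLoop (2 * g.length + 2) g [s] (PySem.List.pySetD st.1 s true), st.2 + 1)
  else st

noncomputable def mrcard (es : List (List Int)) (k : Nat) : Nat :=
  (@Finset.filter Nat (fun t => ∀ j, j < t → ¬ conn es j t) (Classical.decPred _)
    (Finset.range k)).card

theorem sweep_spec (n : Nat) (g es : List (List Int)) (hg : GoodG n g es) (hwf : WFE n es) :
    ∀ k, k ≤ n →
      (((List.range k).map (fun t : Nat => (t : Int))).foldl (sweepF g)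
          (List.replicate n false, 0)).1.length = n ∧
      (∀ i, i < n →
        (vget (((List.range k).map (fun t : Nat => (t : Int))).foldl (sweepF g)
            (List.replicate n false, 0)).1 i = true ↔ ∃ t, t < k ∧ conn es t i)) ∧
      (((List.range k).map (fun t : Nat => (t : Int))).foldl (sweepF g)
          (List.replicate n false, 0)).2 = (mrcard es k : Int) := by
  intro k
  induction k with
  | zero =>
      intro _
      simp only [List.range_zero, List.map_nil, List.foldl_nil]
      refine ⟨List.length_replicate, ?_, by simp [mrcard]⟩
      intro i hi
      have hrep : vget (List.replicate n false) i = false := by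
        unfold vget
        simp only [List.getD, List.getElem?_replicate]
        split <;> rfl
      rw [hrep]
      simp
  | succ k ihk =>
      intro hk1
      have hk : k ≤ n := by omega
      have hkn : k < n := by omega
      obtain ⟨I1, I2, I3⟩ := ihk hk
      rw [List.range_succ, List.map_append, List.foldl_append]
      simp only [List.map_cons, List.map_nil, List.foldl_cons, List.foldl_nil]
      have hklen : k < (((List.range k).map (fun t : Nat => (t : Int))).foldl (sweepF g)
          (List.replicate n false, 0)).1.length := by rw [I1]; exact hkn
      by_cases hv : vget (((List.range k).map (fun t : Nat => (t : Int))).foldl (sweepF g)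
          (List.replicate n false, 0)).1 k = true
      · have hstep : sweepF g (((List.range k).map (fun t : Nat => (t : Int))).foldl (sweepF g)
            (List.replicate n false, 0)) (k : Int) =
            ((List.range k).map (fun t : Nat => (t : Int))).foldl (sweepF g)
              (List.replicate n false, 0) := by
          unfold sweepF
          rw [if_neg]
          rw [PySem.List.pyGetD_natCast]
          intro hc
          have : vget (((List.range k).map (fun t : Nat => (t : Int))).foldl (sweepF g)
              (List.replicate n false, 0)).1 k = false := hc
          rw [hv] at this
          exact absurd this (by simp)
        rw [hstep]
        obtain ⟨t0, ht0, hc0⟩ := (I2 k hkn).1 hv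
        refine ⟨I1, ?_, ?_⟩
        · intro i hi
          rw [I2 i hi]
          constructor
          · rintro ⟨t, ht, hc⟩
            exact ⟨t, by omega, hc⟩
          · rintro ⟨t, ht, hc⟩
            by_cases htk : t = k
            · subst htk
              exact ⟨t0, ht0, hc0.trans hc⟩
            · exact ⟨t, by omega, hc⟩
        · rw [I3]
          have hmr : mrcard es (k + 1) = mrcard es k := by
            unfold mrcard
            letI : DecidablePred (fun t => ∀ j < t, ¬ conn es j t) := Classical.decPred _
            rw [Finset.range_add_one, Finset.filter_insert, if_neg]
            intro hmin
            exact hmin t0 ht0 hc0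
          rw [hmr]
      · have hvf : vget (((List.range k).map (fun t : Nat => (t : Int))).foldl (sweepF g)
            (List.replicate n false, 0)).1 k = false := by
          revert hv
          cases vget (((List.range k).map (fun t : Nat => (t : Int))).foldl (sweepF g)
            (List.replicate n false, 0)).1 k <;> simp
        have hstep : sweepF g (((List.range k).map (fun t : Nat => (t : Int))).foldl (sweepF g)
            (List.replicate n false, 0)) (k : Int) =
            (bfsLoop (2 * g.length + 2) g [(k : Int)]
              ((((List.range k).map (fun t : Nat => (t : Int))).foldl (sweepF g)
                (List.replicate n false, 0)).1.set k true),
             (((List.range k).map (fun t : Nat => (t : Int))).foldl (sweepF g)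
                (List.replicate n false, 0)).2 + 1) := by
          unfold sweepF
          rw [if_pos]
          · rw [PySem.List.pySetD_natCast]
          · rw [PySem.List.pyGetD_natCast]
            exact hvf
        rw [hstep]
        have h0closed : ∀ i j, i < n → j < n →
            vget (((List.range k).map (fun t : Nat => (t : Int))).foldl (sweepF g)
              (List.replicate n false, 0)).1 i = true → conn es i j →
            vget (((List.range k).map (fun t : Nat => (t : Int))).foldl (sweepF g)
              (List.replicate n false, 0)).1 j = true := by
          intro i j hi hj h1 hc
          obtain ⟨t, ht, hct⟩ := (I2 i hi).1 h1
          exact (I2 j hj).2 ⟨t, ht, hct.trans hc⟩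
        have hunvis : unvis n ((((List.range k).map (fun t : Nat => (t : Int))).foldl (sweepF g)
            (List.replicate n false, 0)).1.set k true) ≤ n := by
          unfold unvis
          exact le_trans (Finset.card_filter_le _ _) (by simp)
        obtain ⟨B1, B2⟩ := bfs_spec n g es hg hwf k hkn
          (((List.range k).map (fun t : Nat => (t : Int))).foldl (sweepF g)
            (List.replicate n false, 0)).1 I1 h0closed hvf
          (2 * g.length + 2) [(k : Int)]
          ((((List.range k).map (fun t : Nat => (t : Int))).foldl (sweepF g)
            (List.replicate n false, 0)).1.set k true)
          (by rw [List.length_set]; exact I1)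
          (vget_set_self hklen _)
          (by
            intro x hx
            have hxk : x = (k : Int) := List.mem_singleton.1 hx
            exact ⟨k, hxk, hkn, vget_set_self hklen _, Relation.ReflTransGen.refl⟩)
          (by
            intro i hi h
            by_cases hik : i = k
            · subst hik
              exact Or.inr Relation.ReflTransGen.refl
            · rw [vget_set_ne hik] at h
              exact Or.inl h)
          (by
            intro i hi h
            by_cases hik : i = k
            · subst hik
              exact vget_set_self hklen _
            · rw [vget_set_ne hik]
              exact h)
          (by
            intro x hx h1 h2 h3
            by_cases hxk : x = k
            · subst hxk
              exact absurd (List.mem_singleton.2 rfl) h3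
            · rw [vget_set_ne hxk] at h1
              rw [h1] at h2
              exact absurd h2 (by simp))
          (by
            rw [hg.1]
            simp only [List.length_singleton]
            omega)
        refine ⟨B1, ?_, ?_⟩
        · intro i hi
          rw [B2 i hi]
          constructor
          · intro h
            rcases h with h | h
            · obtain ⟨t, ht, hc⟩ := (I2 i hi).1 h
              exact ⟨t, by omega, hc⟩
            · exact ⟨k, by omega, h⟩
          · rintro ⟨t, ht, hc⟩
            by_cases htk : t = k
            · subst htk
              exact Or.inr hc
            · exact Or.inl ((I2 i hi).2 ⟨t, by omega, hc⟩)
        · rw [I3]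
          have hnomin : ¬ ∃ t, t < k ∧ conn es t k := by
            intro hex
            have := (I2 k hkn).2 hex
            rw [hvf] at this
            exact absurd this (by simp)
          have hmr : mrcard es (k + 1) = mrcard es k + 1 := by
            unfold mrcard
            letI : DecidablePred (fun t => ∀ j < t, ¬ conn es j t) := Classical.decPred _
            rw [Finset.range_add_one, Finset.filter_insert, if_pos]
            · exact Finset.card_insert_of_notMem
                (fun hc => (Finset.mem_range.1 (Finset.filter_subset _ _ hc)).false)
            · intro j hj hc
              exact hnomin ⟨j, hj, hc⟩
          rw [hmr]
          push_cast
          ring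

/- ---------- counting ---------- -/

theorem A_count (n : Nat) (P R : List Int) (good : GoodD n P R) :
    (PySem.List.pyRange 0 (n : Int) 1).foldl
        (fun ans i => if PySem.List.pyGetD P i 0 = i then ans + 1 else ans) 0
      = ((((Finset.range n).filter (fun i => rootD P i = i)).card : Nat) : Int) := by
  rw [PySem.List.pyRange_one]
  have hts : (((n : Int)) - 0).toNat = n := by omega
  rw [hts, List.foldl_map]
  have hfun : (fun (ans : Int) (k : Nat) =>
      if PySem.List.pyGetD P ((0 : Int) + (k : Int)) 0 = ((0 : Int) + (k : Int)) then ans + 1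
      else ans) = fun (ans : Int) (k : Nat) =>
      if PySem.List.pyGetD P ((k : Nat) : Int) 0 = ((k : Nat) : Int) then ans + 1 else ans := by
    funext ans k
    simp
  rw [hfun, pvFoldl_count_ite (fun k : Nat => PySem.List.pyGetD P ((k : Nat) : Int) 0 = ((k : Nat) : Int)),
    pvCountP_range_card (fun k : Nat => PySem.List.pyGetD P ((k : Nat) : Int) 0 = ((k : Nat) : Int))]
  have hfc : (Finset.range n).filter
        (fun k : Nat => PySem.List.pyGetD P ((k : Nat) : Int) 0 = ((k : Nat) : Int)) =
      (Finset.range n).filter (fun i => rootD P i = i) := by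
    apply Finset.filter_congr
    intro i hi
    have hi' : i < n := Finset.mem_range.1 hi
    rw [PySem.List.pyGetD_natCast]
    rw [pfun_fix_iff good (le_of_lt hi'), rootD_eq_self_iff good (le_of_lt hi')]
  rw [hfc]
  omega

theorem fix_filter_eq_image (n : Nat) (P R : List Int) (good : GoodD n P R) :
    (Finset.range n).filter (fun i => rootD P i = i) = (Finset.range n).image (rootD P) := by
  ext j
  simp only [Finset.mem_filter, Finset.mem_image, Finset.mem_range]
  constructor
  · rintro ⟨hj, hfix⟩
    exact ⟨j, hj, hfix⟩
  · rintro ⟨i, hi, rfl⟩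
    exact ⟨rootD_lt good hi, rootD_idem good (le_of_lt hi)⟩

theorem mrcard_eq_image (n : Nat) (P R : List Int) (adj : List (List Int)) (good : GoodD n P R)
    (hD : ∀ i j, i < n → j < n → (rootD P i = rootD P j ↔ conn adj i j)) :
    mrcard adj n = ((Finset.range n).image (rootD P)).card := by
  unfold mrcard
  letI : DecidablePred (fun t => ∀ j < t, ¬ conn adj j t) := Classical.decPred _
  apply Finset.card_bij (fun t _ => rootD P t)
  · intro a ha
    have ha' := Finset.mem_filter.1 ha
    exact Finset.mem_image.2 ⟨a, ha'.1, rfl⟩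
  · intro a1 h1 a2 h2 heq
    have h1' := Finset.mem_filter.1 h1
    have h2' := Finset.mem_filter.1 h2
    have hn1 : a1 < n := Finset.mem_range.1 h1'.1
    have hn2 : a2 < n := Finset.mem_range.1 h2'.1
    have hc : conn adj a1 a2 := (hD a1 a2 hn1 hn2).1 heq
    rcases lt_trichotomy a1 a2 with h | h | h
    · exact absurd hc (h2'.2 a1 h)
    · exact h
    · exact absurd (conn_symm hc) (h1'.2 a2 h)
  · intro b hb
    obtain ⟨i, hi, rfl⟩ := Finset.mem_image.1 hb
    have hi' : i < n := Finset.mem_range.1 hi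
    letI : DecidablePred (fun t => conn adj t i) := Classical.decPred _
    have hine : ((Finset.range n).filter (fun t => conn adj t i)).Nonempty :=
      ⟨i, Finset.mem_filter.2 ⟨hi, Relation.ReflTransGen.refl⟩⟩
    set m := ((Finset.range n).filter (fun t => conn adj t i)).min' hine with hmdef
    have hm := ((Finset.range n).filter (fun t => conn adj t i)).min'_mem hine
    have hm' := Finset.mem_filter.1 hm
    have hmn : m < n := Finset.mem_range.1 hm'.1
    have hmin : ∀ j, j < m → ¬ conn adj j m := by
      intro j hj hc
      have hji : conn adj j i := hc.trans hm'.2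
      have hjn : j < n := by omega
      have hmem : j ∈ (Finset.range n).filter (fun t => conn adj t i) :=
        Finset.mem_filter.2 ⟨Finset.mem_range.2 hjn, hji⟩
      have hle := Finset.min'_le _ j hmem
      omega
    exact ⟨m, Finset.mem_filter.2 ⟨Finset.mem_range.2 hmn, hmin⟩, (hD m i hmn hi').2 hm'.2⟩

/- ---------- the two main branches ---------- -/

theorem main_pos (n : Nat) (adj : List (List Int))
    (hm : ¬ ((adj.length : Int) < (n : Int) - 1)) (hwf : WFE n adj) :
    Solve (n : Int) adj = Solve_alt (n : Int) adj := by
  simp only [Solve, Solve_alt]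
  rw [if_neg hm, if_neg hm]
  -- the initial DSU state
  have hP0len : (PySem.List.pyRange 0 ((n : Int) + 1) 1).length = n + 1 := by
    rw [PySem.List.length_pyRange_one]; omega
  have hP0get : ∀ i : Nat, i ≤ n →
      (PySem.List.pyRange 0 ((n : Int) + 1) 1).getD i 0 = (i : Int) := by
    intro i hi
    rw [PySem.List.pyRange_one]
    have hts : (((n : Int) + 1) - 0).toNat = n + 1 := by omega
    rw [hts, List.getD, List.getElem?_map, List.getElem?_range (by omega : i < n + 1)]
    simp
  have hR0len : (List.replicate ((n : Int) + 1).toNat (0 : Int)).length = n + 1 := by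
    rw [List.length_replicate]; omega
  have hpfun0 : ∀ i : Nat, i ≤ n → pfun (PySem.List.pyRange 0 ((n : Int) + 1) 1) i = i := by
    intro i hi
    unfold pfun
    rw [hP0get i hi]
    exact Int.toNat_natCast i
  have good0 : GoodD n (PySem.List.pyRange 0 ((n : Int) + 1) 1)
      (List.replicate ((n : Int) + 1).toNat (0 : Int)) := by
    refine ⟨hP0len, hR0len, ?_, hP0get n le_rfl, ?_⟩
    · intro i hi
      rw [hP0get i (le_of_lt hi)]
      exact ⟨Int.natCast_nonneg _, by exact_mod_cast hi⟩
    · intro i hi hne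
      exact absurd (hpfun0 i hi) hne
  have hD0 : ∀ i j, i < n → j < n →
      (rootD (PySem.List.pyRange 0 ((n : Int) + 1) 1) i =
        rootD (PySem.List.pyRange 0 ((n : Int) + 1) 1) j ↔ conn [] i j) := by
    intro i j hi hj
    rw [rootD_of_fix good0 (le_of_lt hi) (hpfun0 i (le_of_lt hi)),
      rootD_of_fix good0 (le_of_lt hj) (hpfun0 j (le_of_lt hj)), conn_nil]
  obtain ⟨goodF, hDF⟩ := dsu_fold n adj [] _ _ hwf good0 hD0
  rw [List.nil_append] at hDF
  -- A's answer counts DSU roots below n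
  rw [A_count n _ _ goodF, fix_filter_eq_image n _ _ goodF]
  -- B's side: the range list and the adjacency list
  have hrange : PySem.List.pyRange 0 (n : Int) 1 =
      (List.range n).map (fun t : Nat => (t : Int)) := by
    rw [PySem.List.pyRange_one]
    have hts : ((n : Int) - 0).toNat = n := by omega
    rw [hts]
    exact List.map_congr_left (fun k _ => by simp)
  have hVtoNat : ((n : Int)).toNat = n := Int.toNat_natCast n
  rw [hrange, hVtoNat]
  have hg0get : ∀ x : Nat,
      (((List.range n).map (fun t : Nat => (t : Int))).map
        (fun _ => ([] : List Int))).getD x [] = [] := by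
    intro x
    rcases Nat.lt_or_ge x n with h | h
    · have hx : x < (((List.range n).map (fun t : Nat => (t : Int))).map
          (fun _ => ([] : List Int))).length := by simp; omega
      rw [List.getD, List.getElem?_eq_getElem hx]
      simp
    · rw [List.getD, List.getElem?_eq_none (by simp; omega)]
      rfl
  have hg0 : GoodG n (((List.range n).map (fun t : Nat => (t : Int))).map
      (fun _ => ([] : List Int))) [] := by
    refine ⟨by simp, ?_, ?_⟩
    · intro x hx z hz
      rw [hg0get x] at hz
      exact absurd hz (by simp)
    · intro x y hx hy
      unfold nbr
      rw [hg0get x]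
      simp [estep]
  have hgood_g := build_fold n adj [] _ hwf hg0
  rw [List.nil_append] at hgood_g
  have hlam : (fun (st : List Bool × Int) (s : Int) =>
      if PySem.List.pyGetD st.1 s false = false then
        (bfsLoop
          (2 * (adj.foldl addEdge (((List.range n).map (fun t : Nat => (t : Int))).map
            (fun _ => ([] : List Int)))).length + 2)
          (adj.foldl addEdge (((List.range n).map (fun t : Nat => (t : Int))).map
            (fun _ => ([] : List Int)))) [s]
          (PySem.List.pySetD st.1 s true), st.2 + 1)
      else st) = sweepF (adj.foldl addEdge (((List.range n).map (fun t : Nat => (t : Int))).map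
        (fun _ => ([] : List Int)))) := rfl
  rw [hlam]
  obtain ⟨S1, S2, S3⟩ := sweep_spec n
    (adj.foldl addEdge (((List.range n).map (fun t : Nat => (t : Int))).map
      (fun _ => ([] : List Int)))) adj hgood_g hwf n le_rfl
  rw [S3, mrcard_eq_image n _ _ adj goodF hDF]

theorem main_neg (V : Int) (adj : List (List Int)) (hV : V < 0) (hadj : adj = []) :
    Solve V adj = Solve_alt V adj := by
  subst hadj
  have hg : ¬ (((List.length ([] : List (List Int))) : Int) < V - 1) := by
    simp
    omega
  simp only [Solve, Solve_alt, List.foldl_nil]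
  rw [if_neg hg, if_neg hg, PySem.List.pyRange_one_eq_nil (by omega : V ≤ 0)]
  simp

-- ===== VERDICT (by name: the statement is the Claim_ definition above) =====
theorem Solve_spec : Claim_equal_Solve := by
  intro V adj _hdom hpre
  unfold Spec_Solve
  by_cases hm : (adj.length : Int) < V - 1
  · unfold Solve Solve_alt
    rw [if_pos hm, if_pos hm]
  · have hrows : ∀ row ∈ adj, row.length = 2 ∧ ∀ x ∈ row, 0 ≤ x ∧ x < V :=
      hpre.resolve_left hm
    by_cases hV : 0 ≤ V
    · obtain ⟨n, rfl⟩ : ∃ n : Nat, V = (n : Int) := ⟨V.toNat, (Int.toNat_of_nonneg hV).symm⟩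
      have hwf : WFE n adj := by
        intro row hrow
        obtain ⟨hlen, hbound⟩ := hrows row hrow
        match row, hlen with
        | [a, b], _ =>
            obtain ⟨ha0, haV⟩ := hbound a (by simp)
            obtain ⟨hb0, hbV⟩ := hbound b (by simp)
            refine ⟨a.toNat, b.toNat, ?_, ?_, ?_⟩
            · simp [Int.toNat_of_nonneg, ha0, hb0]
            · omega
            · omega
      exact main_pos n adj hm hwf
    · have hadj : adj = [] := by
        cases adj with
        | nil => rfl
        | cons row rest =>
            obtain ⟨hlen, hbound⟩ := hrows row (by simp)
            match row, hlen with
            | [a, b], _ =>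
                obtain ⟨ha0, haV⟩ := hbound a (by simp)
                omega
      exact main_neg V adj (by omega) hadj
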